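-- pv_equiv track=rewrite | github.com/averyfairbanks/coding-exercise_3-21-21 | second_optimized.py | times_repeated
-- ===== SOURCE A (Python) =====
-- def times_repeated(s, t):
--     if not contains_chars(s, t):  # O(m * n)
--         return -1
--
--     times = 0
--     s_idx = 0
--     t_idx = 0
--     while t_idx < len(t): # O(m * n)
--         i = s_idx
--
--         times_on_enter = times
--         while times <= times_on_enter + 1:
--             if i == 0:
--                 times += 1
--
--             if s[i] == t[t_idx]:
--                 t_idx += 1
--                 s_idx = (i + 1) % len(s)
--                 break
--             i = (i + 1) % len(s)
--
--     return times
--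
-- def contains_chars(s, t):
--     for ch in t:
--         if s.find(ch) == -1:
--             return False
--     return True
-- ===== SOURCE B (Python) =====
-- def times_repeated(s, t):
--     # Alternative algorithm: nxt[r] maps each character of s to its first
--     # occurrence at index >= r; one O(1) lookup per character of t.
--     n = len(s)
--     nxt = [{}] * (n + 1)
--     for i in range(n - 1, -1, -1):
--         d = dict(nxt[i + 1])
--         d[s[i]] = i
--         nxt[i] = d
--     first = nxt[0]
--     times = 0
--     r = 0
--     for ch in t:
--         j = nxt[r].get(ch)
--         if j is None:
--             if ch not in first:
--                 return -1
--             times += 1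
--             j = first[ch]
--         elif r == 0:
--             times += 1
--         r = (j + 1) % n
--     return times
-- ===== Notes on version B (the rewrite author's own statement) =====
-- stated objective: alternative
-- what changed: Replaces A's O(m*n) membership prepass and per-character wrap-around rescans of s by a next-occurrence jump table (one dict per suffix position, built once back to front), so each character of t is answered by a single dictionary lookup; the precomputation makes it no faster overall on the timed inputs.
import Mathlib
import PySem

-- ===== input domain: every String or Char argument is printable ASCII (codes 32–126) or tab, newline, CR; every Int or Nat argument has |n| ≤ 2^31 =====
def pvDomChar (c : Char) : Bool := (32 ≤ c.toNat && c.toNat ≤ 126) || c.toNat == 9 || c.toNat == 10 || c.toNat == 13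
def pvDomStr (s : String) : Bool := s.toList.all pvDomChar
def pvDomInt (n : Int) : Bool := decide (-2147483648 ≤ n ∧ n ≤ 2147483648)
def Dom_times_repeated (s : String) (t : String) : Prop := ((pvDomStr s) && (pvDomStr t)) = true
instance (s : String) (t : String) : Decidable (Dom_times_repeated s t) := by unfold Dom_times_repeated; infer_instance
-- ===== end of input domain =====

-- B is an alternative algorithm: instead of A's membership prepass and wrap-around
-- rescans of s, it precomputes a next-occurrence jump table (one dict per suffix
-- position) and answers each character of t with a single dictionary lookup.

-- ===== PORT A =====
-- contains_chars: for ch in t: if s.find(ch) == -1: return False; return True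
def containsCharsGo (s : String) : List Char → Bool
  | [] => true
  | c :: rest =>
      if PySem.Str.find s (String.ofList [c]) = -1 then false else containsCharsGo s rest

def containsChars (s : String) (t : String) : Bool := containsCharsGo s t.toList

-- A's inner while loop, fuel-based (the loop condition itself bounds it by 2n+3 steps;
-- none = the loop exited without a break, where the Python outer loop would spin forever).
def innerA (l : List Char) (c : Char) : Nat → Int → Int → Nat → Option (Int × Nat)
  | 0, _, _, _ => none
  | fuel + 1, times, enter, i =>
      if times ≤ enter + 1 then
        if l[i]? = some c then some ((if i = 0 then times + 1 else times), (i + 1) % l.length)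
        else innerA l c fuel (if i = 0 then times + 1 else times) enter ((i + 1) % l.length)
      else none

-- A's outer while loop: one inner-loop run per remaining character of t.
def outerA (l : List Char) : List Char → Int → Nat → Int
  | [], times, _ => times
  | c :: rest, times, sIdx =>
      match innerA l c (2 * l.length + 3) times times sIdx with
      | some (times', sIdx') => outerA l rest times' sIdx'
      | none => times  -- Python diverges here; unreachable once contains_chars passed

def times_repeated (s : String) (t : String) : Int :=
  if containsChars s t = false then -1
  else outerA s.toList t.toList 0 0

-- ===== PORT B =====
-- nxt[i] maps each char of s to its first occurrence at index ≥ i (Source B builds the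
-- list back to front; this recursion over the suffix is that backward loop).
def nxtTabs : List Char → Int → List (PySem.Dict Char Int)
  | [], _ => [PySem.Dict.empty]
  | c :: rest, i =>
      let tail := nxtTabs rest (i + 1)
      PySem.Dict.insert (tail.headD PySem.Dict.empty) c i :: tail

-- Source B's single pass over t.
def loopB (l : List Char) (tabs : List (PySem.Dict Char Int))
    (first : PySem.Dict Char Int) : List Char → Int → Int → Int
  | [], times, _ => times
  | c :: rest, times, r =>
      match PySem.Dict.get? (PySem.List.pyGetD tabs r PySem.Dict.empty) c with
      | none =>
          match PySem.Dict.get? first c with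
          | none => -1
          | some j => loopB l tabs first rest (times + 1) (PySem.Int.mod (j + 1) (l.length : Int))
      | some j =>
          let times' := if r = 0 then times + 1 else times
          loopB l tabs first rest times' (PySem.Int.mod (j + 1) (l.length : Int))

def times_repeated_alt (s : String) (t : String) : Int :=
  let l := s.toList
  let tabs := nxtTabs l 0
  loopB l tabs (tabs.headD PySem.Dict.empty) t.toList 0 0

-- ===== PRECONDITION & SPEC =====
def Spec_times_repeated (s : String) (t : String) (out : Int) : Prop := out = times_repeated_alt s t
instance (s : String) (t : String) (out : Int) : Decidable (Spec_times_repeated s t out) := by unfold Spec_times_repeated; infer_instance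

-- ===== CLAIM (what is proved, stated in full; the proofs are below) =====
def Claim_equal_times_repeated : Prop := ∀ (s : String) (t : String), Dom_times_repeated s t → Spec_times_repeated s t (times_repeated s t)

-- ===== LEMMAS AND PROOFS =====

-- first index j ≥ r with l[j] = c (the common specification of both searches)
def nextGe (l : List Char) (c : Char) (r : Nat) : Option Nat :=
  if h : r < l.length then
    if l[r] = c then some r else nextGe l c (r + 1)
  else none
termination_by l.length - r

-- what A's inner loop computes, phrased through nextGe
def innerSpec (l : List Char) (c : Char) (e : Int) (r : Nat) : Option (Int × Nat) :=
  match nextGe l c r with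
  | some j => some ((if r = 0 then e + 1 else e), (j + 1) % l.length)
  | none => (nextGe l c 0).map (fun j => (e + 1, (j + 1) % l.length))

lemma nextGe_eq (l : List Char) (c : Char) (r : Nat) :
    nextGe l c r
      = if h : r < l.length then (if l[r] = c then some r else nextGe l c (r + 1)) else none := by
  rw [nextGe]

lemma nextGe_none {l : List Char} {c : Char} {r : Nat} (h : nextGe l c r = none) :
    ∀ m, r ≤ m → m < l.length → l[m]? ≠ some c := by
  intro m hrm hm
  induction hm' : l.length - r generalizing r with
  | zero => omega
  | succ k ih =>
      unfold nextGe at h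
      rw [dif_pos (by omega)] at h
      by_cases hc : l[r] = c
      · simp [hc] at h
      · rw [if_neg hc] at h
        rcases Nat.eq_or_lt_of_le hrm with hEq | hLt
        · subst hEq; simp [List.getElem?_eq_getElem hm, hc]
        · exact ih h (by omega) (by omega)

lemma nextGe_some {l : List Char} {c : Char} {r j : Nat} (h : nextGe l c r = some j) :
    r ≤ j ∧ j < l.length ∧ l[j]? = some c ∧ ∀ m, r ≤ m → m < j → l[m]? ≠ some c := by
  induction hm' : l.length - r generalizing r with
  | zero => unfold nextGe at h; rw [dif_neg (by omega)] at h; simp at h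
  | succ k ih =>
      unfold nextGe at h
      by_cases hr : r < l.length
      · rw [dif_pos hr] at h
        by_cases hc : l[r] = c
        · rw [if_pos hc] at h
          simp only [Option.some.injEq] at h
          subst h
          exact ⟨le_refl _, hr, by simp [List.getElem?_eq_getElem hr, hc], by omega⟩
        · rw [if_neg hc] at h
          obtain ⟨h1, h2, h3, h4⟩ := ih h (by omega)
          refine ⟨by omega, h2, h3, ?_⟩
          intro m hrm hmj
          rcases Nat.eq_or_lt_of_le hrm with hEq | hLt
          · subst hEq; simp [List.getElem?_eq_getElem hr, hc]
          · exact h4 m (by omega) hmj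
      · rw [dif_neg hr] at h; simp at h

lemma nextGe_zero_of_mem {l : List Char} {c : Char} (hc : c ∈ l) :
    ∃ j, nextGe l c 0 = some j := by
  cases h : nextGe l c 0 with
  | some j => exact ⟨j, rfl⟩
  | none =>
      exfalso
      obtain ⟨i, hi, hic⟩ := List.getElem_of_mem hc
      exact nextGe_none h i (Nat.zero_le _) hi (by simp [List.getElem?_eq_getElem hi, hic])

-- one unfolding of the inner loop
lemma innerA_succ (l : List Char) (c : Char) (f : Nat) (times enter : Int) (i : Nat) :
    innerA l c (f + 1) times enter i =
      if times ≤ enter + 1 then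
        if l[i]? = some c then some ((if i = 0 then times + 1 else times), (i + 1) % l.length)
        else innerA l c f (if i = 0 then times + 1 else times) enter ((i + 1) % l.length)
      else none := rfl

-- scanning a match-free tail [i, n) just moves the loop to index 0, unchanged state
lemma inner_skip (l : List Char) (c : Char) (e t : Int) :
    ∀ (i f : Nat), 0 < i → i < l.length → t ≤ e + 1 →
      (∀ m, i ≤ m → m < l.length → l[m]? ≠ some c) →
      innerA l c (l.length - i + f) t e i = innerA l c f t e 0 := by
  intro i f hi0 hin ht hno
  induction hd : l.length - i generalizing i f with
  | zero => omega
  | succ k ih =>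
      rw [show k + 1 + f = (k + f) + 1 from by omega, innerA_succ, if_pos ht, if_neg (hno i le_rfl hin),
        if_neg (by omega : ¬ i = 0)]
      by_cases hlast : i + 1 = l.length
      · have hk : k = 0 := by omega
        rw [show (i + 1) % l.length = 0 from by rw [hlast, Nat.mod_self], hk, Nat.zero_add]
      · rw [show (i + 1) % l.length = i + 1 from Nat.mod_eq_of_lt (by omega)]
        exact ih (i + 1) f (by omega) (by omega) (fun m hm hml => hno m (by omega) hml) (by omega)

-- scanning from i > 0 up to the first match j returns (t, (j+1) % n)
lemma inner_find (l : List Char) (c : Char) (e t : Int) :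
    ∀ (i j f : Nat), 0 < i → i ≤ j → j < l.length → l[j]? = some c →
      (∀ m, i ≤ m → m < j → l[m]? ≠ some c) → t ≤ e + 1 → j - i < f →
      innerA l c f t e i = some (t, (j + 1) % l.length) := by
  intro i j f hi0 hij hjn hj hno ht hf
  induction hd : j - i generalizing i f with
  | zero =>
      have hij' : i = j := by omega
      subst hij'
      obtain ⟨f', rfl⟩ : ∃ f', f = f' + 1 := ⟨f - 1, by omega⟩
      rw [innerA_succ, if_pos ht, if_pos hj, if_neg (by omega : ¬ i = 0)]
  | succ k ih =>
      obtain ⟨f', rfl⟩ : ∃ f', f = f' + 1 := ⟨f - 1, by omega⟩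
      rw [innerA_succ, if_pos ht, if_neg (hno i le_rfl (by omega)),
        if_neg (by omega : ¬ i = 0),
        show (i + 1) % l.length = i + 1 from Nat.mod_eq_of_lt (by omega)]
      exact ih (i + 1) f' (by omega) (by omega) (fun m hm hml => hno m (by omega) hml)
        (by omega) (by omega)

-- entering the loop at index 0: the times increment, then the scan to the first match
lemma inner_from_zero (l : List Char) (c : Char) (e t : Int) (f : Nat) (j0 : Nat)
    (hn : 0 < l.length) (ht : t ≤ e) (hj0 : nextGe l c 0 = some j0)
    (hf : l.length + 1 < f) :
    innerA l c f t e 0 = some (t + 1, (j0 + 1) % l.length) := by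
  obtain ⟨-, hj0n, hj0c, hj0no⟩ := nextGe_some hj0
  obtain ⟨f', rfl⟩ : ∃ f', f = f' + 1 := ⟨f - 1, by omega⟩
  rw [innerA_succ, if_pos (by omega : t ≤ e + 1), if_pos rfl]
  by_cases h0 : j0 = 0
  · subst h0; rw [if_pos hj0c]
  · have hne : l[0]? ≠ some c := hj0no 0 (Nat.le_refl 0) (by omega)
    rw [if_neg hne,
      show (0 + 1) % l.length = 1 from Nat.mod_eq_of_lt (by omega)]
    exact inner_find l c e (t + 1) 1 j0 f' (by omega) (by omega) hj0n hj0c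
      (fun m hm hml => hj0no m (by omega) hml) (by omega) (by omega)

-- A's inner loop computes innerSpec whenever the character occurs in s
lemma inner_spec (l : List Char) (c : Char) (e : Int) (r : Nat)
    (hn : 0 < l.length) (hr : r < l.length) (hc : c ∈ l) :
    innerA l c (2 * l.length + 3) e e r = innerSpec l c e r := by
  unfold innerSpec
  obtain ⟨j0, hj0⟩ := nextGe_zero_of_mem hc
  cases hng : nextGe l c r with
  | some j =>
      obtain ⟨hrj, hjn, hjc, hjno⟩ := nextGe_some hng
      by_cases hr0 : r = 0
      · subst hr0
        rw [if_pos rfl]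
        have hjj0 : j0 = j := by rw [hj0] at hng; exact (Option.some.injEq _ _ ▸ hng : _)
        subst hjj0
        exact inner_from_zero l c e e (2 * l.length + 3) j0 hn le_rfl hj0 (by omega)
      · rw [if_neg hr0]
        exact inner_find l c e e r j (2 * l.length + 3) (by omega) hrj hjn hjc hjno (by omega) (by omega)
  | none =>
      have hr0 : r ≠ 0 := by
        intro h; subst h; rw [hj0] at hng; simp at hng
      rw [hj0]
      have hno := nextGe_none hng
      have hskip := inner_skip l c e e r (l.length + r + 3) (by omega) hr (by omega) hno
      rw [show 2 * l.length + 3 = l.length - r + (l.length + r + 3) from by omega, hskip]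
      simp only [Option.map_some]
      exact inner_from_zero l c e e (l.length + r + 3) j0 hn le_rfl hj0 (by omega)

-- index shift: searching a::rest from k+1 is searching rest from k, plus one
lemma nextGe_cons_shift (a : Char) (rest : List Char) (c : Char) (k : Nat) :
    nextGe (a :: rest) c (k + 1) = (nextGe rest c k).map (· + 1) := by
  induction hd : rest.length - k generalizing k with
  | zero =>
      unfold nextGe
      rw [dif_neg (by simp; omega), dif_neg (by omega)]
      simp
  | succ m ih =>
      unfold nextGe
      rw [dif_pos (by simp; omega), dif_pos (by omega)]
      simp only [List.getElem_cons_succ]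
      by_cases hc : rest[k] = c
      · simp [hc]
      · rw [if_neg hc, if_neg hc, ih (k + 1) (by omega)]

-- the jump table at row k answers nextGe (values offset by the base index)
lemma tab_get (c : Char) : ∀ (l : List Char) (base : Int) (k : Nat), k ≤ l.length →
    PySem.Dict.get? ((nxtTabs l base).getD k PySem.Dict.empty) c
      = (nextGe l c k).map (fun j : Nat => base + (j : Int)) := by
  intro l
  induction l with
  | nil =>
      intro base k hk
      have hk0 : k = 0 := Nat.le_zero.mp (by simpa using hk)
      subst hk0
      simp [nxtTabs, nextGe, PySem.Dict.get?_empty]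
  | cons a rest ih =>
      intro base k hk
      cases k with
      | zero =>
          have hhead : (nxtTabs rest (base + 1)).headD PySem.Dict.empty
              = (nxtTabs rest (base + 1)).getD 0 PySem.Dict.empty := by
            cases rest <;> simp [nxtTabs]
          simp only [nxtTabs, List.getD_cons_zero]
          rw [hhead]
          rw [PySem.Dict.get?_insert]
          by_cases hac : c = a
          · subst hac
            have : nextGe (c :: rest) c 0 = some 0 := by
              unfold nextGe
              rw [dif_pos (by simp)]
              simp
            simp [this]
          · rw [if_neg hac, ih (base + 1) 0 (Nat.zero_le _)]
            have hstep : nextGe (a :: rest) c 0 = (nextGe rest c 0).map (· + 1) := by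
              have h1 : nextGe (a :: rest) c 0 = nextGe (a :: rest) c (0 + 1) := by
                rw [nextGe_eq, dif_pos (by simp : 0 < (a :: rest).length),
                  if_neg (by simpa using fun h => hac h.symm)]
              rw [h1, nextGe_cons_shift]
            rw [hstep]
            cases nextGe rest c 0 <;> simp
            omega
      | succ m =>
          simp only [nxtTabs, List.getD_cons_succ]
          rw [ih (base + 1) m (by simpa using hk)]
          rw [nextGe_cons_shift]
          cases nextGe rest c m <;> simp
          omega

-- a single character is an infix exactly when it is a member
lemma singleton_infix_iff (c : Char) (l : List Char) : [c] <:+: l ↔ c ∈ l := by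
  constructor
  · intro h
    exact h.sublist.subset (by simp)
  · intro h
    obtain ⟨u, v, huv⟩ := List.append_of_mem h
    exact ⟨u, v, by rw [huv]; simp⟩

-- contains_chars means every character of t occurs in s
lemma containsCharsGo_iff (s : String) (cs : List Char) :
    containsCharsGo s cs = true ↔ ∀ c ∈ cs, c ∈ s.toList := by
  induction cs with
  | nil => simp [containsCharsGo]
  | cons c rest ih =>
      unfold containsCharsGo
      have hiff : (PySem.Str.find s (String.ofList [c]) = -1) ↔ c ∉ s.toList := by
        rw [PySem.Str.find_eq_neg_one_iff]
        simp [singleton_infix_iff]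
      by_cases hfind : PySem.Str.find s (String.ofList [c]) = -1
      · rw [if_pos hfind]
        simp only [Bool.false_eq_true, false_iff]
        intro hall
        exact (hiff.mp hfind) (hall c (by simp))
      · rw [if_neg hfind, ih]
        have hmem : c ∈ s.toList := not_not.mp (fun h => hfind (hiff.mpr h))
        constructor
        · intro hall d hd
          rcases List.mem_cons.mp hd with h | h
          · exact h ▸ hmem
          · exact hall d h
        · intro hall d hd
          exact hall d (List.mem_cons.mpr (Or.inr hd))

-- if some character of t is missing from s, B's loop returns -1
lemma loopB_neg (l : List Char) :
    ∀ (cs : List Char) (e : Int) (r : Nat), r ≤ l.length →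
      (∃ c ∈ cs, c ∉ l) →
      loopB l (nxtTabs l 0) ((nxtTabs l 0).headD PySem.Dict.empty) cs e (r : Int) = -1 := by
  intro cs
  induction cs with
  | nil => rintro e r hr ⟨c, hc, -⟩; simp at hc
  | cons c rest ih =>
      intro e r hr hex
      have hhead : (nxtTabs l 0).headD PySem.Dict.empty = (nxtTabs l 0).getD 0 PySem.Dict.empty := by
        cases l <;> simp [nxtTabs]
      unfold loopB
      rw [PySem.List.pyGetD_natCast, tab_get c l 0 r hr, hhead, tab_get c l 0 0 (Nat.zero_le _),
        ← hhead]
      by_cases hcl : c ∈ l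
      · have hn : 0 < l.length := List.length_pos_of_mem hcl
        obtain ⟨j0, hj0⟩ := nextGe_zero_of_mem hcl
        have hex' : ∃ d ∈ rest, d ∉ l := by
          rcases hex with ⟨d, hd, hdl⟩
          rcases List.mem_cons.mp hd with h | h
          · exact absurd hcl (h ▸ hdl)
          · exact ⟨d, h, hdl⟩
        cases hng : nextGe l c r with
        | some j =>
            obtain ⟨-, hjn, -, -⟩ := nextGe_some hng
            simp only [Option.map_some]
            have hcast : PySem.Int.mod ((0 : Int) + (j : Int) + 1) (l.length : Int)
                = (((j + 1) % l.length : Nat) : Int) := by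
              have : (0 : Int) + (j : Int) + 1 = ((j + 1 : Nat) : Int) := by push_cast; ring
              rw [this, PySem.Int.mod_natCast]
            rw [hcast]
            exact ih _ _ (le_of_lt (Nat.mod_lt _ hn)) hex'
        | none =>
            simp only [Option.map_none, hj0, Option.map_some]
            have hcast : PySem.Int.mod ((0 : Int) + (j0 : Int) + 1) (l.length : Int)
                = (((j0 + 1) % l.length : Nat) : Int) := by
              have : (0 : Int) + (j0 : Int) + 1 = ((j0 + 1 : Nat) : Int) := by push_cast; ring
              rw [this, PySem.Int.mod_natCast]
            rw [hcast]
            exact ih _ _ (le_of_lt (Nat.mod_lt _ hn)) hex'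
      · have h1 : nextGe l c r = none := by
          cases h : nextGe l c r with
          | none => rfl
          | some j =>
              obtain ⟨-, hjn, hjc, -⟩ := nextGe_some h
              exact absurd (List.mem_of_getElem? hjc) hcl
        have h2 : nextGe l c 0 = none := by
          cases h : nextGe l c 0 with
          | none => rfl
          | some j =>
              obtain ⟨-, hjn, hjc, -⟩ := nextGe_some h
              exact absurd (List.mem_of_getElem? hjc) hcl
        rw [h1, h2]
        rfl

-- the main loop correspondence, under "every character of t occurs in s"
lemma main_loop (l : List Char) (hl : l ≠ []) :
    ∀ (cs : List Char) (e : Int) (r : Nat), r < l.length →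
      (∀ c ∈ cs, c ∈ l) →
      outerA l cs e r
        = loopB l (nxtTabs l 0) ((nxtTabs l 0).headD PySem.Dict.empty) cs e (r : Int) := by
  intro cs
  have hn : 0 < l.length := List.length_pos_iff.mpr hl
  have hhead : (nxtTabs l 0).headD PySem.Dict.empty = (nxtTabs l 0).getD 0 PySem.Dict.empty := by
    cases l <;> simp [nxtTabs]
  induction cs with
  | nil => intro e r hr _; simp [outerA, loopB]
  | cons c rest ih =>
      intro e r hr hall
      have hc : c ∈ l := hall c (by simp)
      obtain ⟨j0, hj0⟩ := nextGe_zero_of_mem hc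
      have hall' : ∀ d ∈ rest, d ∈ l := fun d hd => hall d (by simp [hd])
      unfold outerA loopB
      rw [inner_spec l c e r hn hr hc]
      rw [PySem.List.pyGetD_natCast, tab_get c l 0 r (le_of_lt hr), hhead,
        tab_get c l 0 0 (Nat.zero_le _), hj0, ← hhead]
      unfold innerSpec
      cases hng : nextGe l c r with
      | some j =>
          obtain ⟨-, hjn, -, -⟩ := nextGe_some hng
          simp only [Option.map_some]
          have hcast : PySem.Int.mod ((0 : Int) + (j : Int) + 1) (l.length : Int)
              = (((j + 1) % l.length : Nat) : Int) := by
            have : (0 : Int) + (j : Int) + 1 = ((j + 1 : Nat) : Int) := by push_cast; ring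
            rw [this, PySem.Int.mod_natCast]
          rw [hcast]
          by_cases h0 : r = 0
          · rw [if_pos h0, if_pos (by simp [h0] : (r : Int) = 0)]
            exact ih _ _ (Nat.mod_lt _ hn) hall'
          · rw [if_neg h0, if_neg (by exact_mod_cast h0)]
            exact ih _ _ (Nat.mod_lt _ hn) hall'
      | none =>
          rw [hj0]
          simp only [Option.map_none, Option.map_some]
          have hcast : PySem.Int.mod ((0 : Int) + (j0 : Int) + 1) (l.length : Int)
              = (((j0 + 1) % l.length : Nat) : Int) := by
            have : (0 : Int) + (j0 : Int) + 1 = ((j0 + 1 : Nat) : Int) := by push_cast; ring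
            rw [this, PySem.Int.mod_natCast]
          rw [hcast]
          exact ih _ _ (Nat.mod_lt _ hn) hall'

-- ===== VERDICT (by name: the statement is the Claim_ definition above) =====
theorem times_repeated_spec : Claim_equal_times_repeated := by
  intro s t _
  unfold Spec_times_repeated times_repeated times_repeated_alt
  by_cases hcc : containsChars s t = false
  · rw [if_pos hcc]
    have hex : ∃ c ∈ t.toList, c ∉ s.toList := by
      have : ¬ (∀ c ∈ t.toList, c ∈ s.toList) := by
        intro h
        unfold containsChars at hcc
        rw [(containsCharsGo_iff s t.toList).mpr h] at hcc
        simp at hcc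
      push Not at this
      exact this
    exact ((loopB_neg s.toList t.toList 0 0 (Nat.zero_le _) hex).symm : _)
  · rw [if_neg hcc]
    have hc : containsChars s t = true := by
      cases h : containsChars s t
      · exact absurd h hcc
      · rfl
    have hall : ∀ c ∈ t.toList, c ∈ s.toList :=
      (containsCharsGo_iff s t.toList).mp (by unfold containsChars at hc; exact hc)
    by_cases hl : s.toList = []
    · have ht : t.toList = [] := by
        cases htl : t.toList with
        | nil => rfl
        | cons c rest =>
            exact absurd (hall c (by simp [htl])) (by simp [hl])
      rw [ht]
      simp [outerA, loopB]
    · exact (main_loop s.toList hl t.toList 0 0 (List.length_pos_iff.mpr hl) hall)
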